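-- pv_equiv track=rewrite | github.com/themysterysolver/weekly-contests | WEEK5/IPL/script.py | reorderQueue
-- ===== SOURCE A (Python) =====
-- def reorderQueue(length, offset, skip):
--     l = length
--     arr = [i for i in range(l)]
--     current = offset - 1
--     reordered = []
--     if skip < 0:
--         skip -= 1
--         current = (current + 1) % l
--     while l > 0:
--         current = (current + skip) % l
--         reordered.append(arr.pop(current))
--         current = current % l
--         l -= 1
--
--     return reordered
-- ===== SOURCE B (Python) =====
-- def _build(lo, hi):
--     # complete count tree over values lo..hi-1; leaf = [1, value], node = [count, left, right]
--     if hi - lo == 1: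
--         return [1, lo]
--     mid = (lo + hi) // 2
--     return [hi - lo, _build(lo, mid), _build(mid, hi)]
--
--
-- def _extract(t, k):
--     # value of the k-th alive leaf; marks it dead, decrementing counts in place
--     while len(t) == 3:
--         t[0] -= 1
--         left = t[1]
--         if k < left[0]:
--             t = left
--         else:
--             k -= left[0]
--             t = t[2]
--     t[0] = 0
--     return t[1]
--
--
-- def reorderQueue(length, offset, skip):
--     # order-statistics count tree: find-and-delete the k-th survivor in O(log n)
--     step = skip
--     current = offset - 1
--     if skip < 0:
--         step = skip - 1
--         current = current + 1
--     out = []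
--     size = length if length > 0 else 0
--     if size == 0:
--         return out
--     t = _build(0, size)
--     while size > 0:
--         current = (current + step) % size
--         out.append(_extract(t, current))
--         size -= 1
--     return out
-- ===== Notes on version B (the rewrite author's own statement) =====
-- stated objective: alternative
-- what changed: B replaces A's pop(current) on a shrinking array (a linear shift per round) by an order-statistics count tree that finds and deletes the k-th surviving value by a per-round tree descent (O(n log n) algorithm; a timing run read only ~1.3x at the largest measured size, so no speed is claimed).
import Mathlib
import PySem

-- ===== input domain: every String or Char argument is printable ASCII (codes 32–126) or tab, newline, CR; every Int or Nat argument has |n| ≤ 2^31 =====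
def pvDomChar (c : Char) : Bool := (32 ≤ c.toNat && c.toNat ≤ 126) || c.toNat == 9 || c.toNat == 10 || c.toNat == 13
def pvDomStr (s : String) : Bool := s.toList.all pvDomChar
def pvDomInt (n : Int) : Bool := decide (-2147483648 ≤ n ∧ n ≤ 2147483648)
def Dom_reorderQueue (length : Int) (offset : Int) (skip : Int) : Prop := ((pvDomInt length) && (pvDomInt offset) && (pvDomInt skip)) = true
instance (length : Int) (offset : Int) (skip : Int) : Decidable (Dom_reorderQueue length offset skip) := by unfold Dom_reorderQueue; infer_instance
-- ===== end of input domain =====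

-- B replaces A's pop(current) on a shrinking array by an order-statistics
-- count tree that finds and deletes the k-th survivor by a per-round tree
-- descent (objective: alternative algorithm).

-- ===== PORT A =====
-- literal port of A's while-loop: state (l, current, arr, reordered), pop at index
def reorderA_loop (skp : Int) (l : Int) (current : Int) (arr : List Int) (reordered : List Int) : List Int :=
  if _h : l > 0 then
    let c := PySem.Int.mod (current + skp) l
    match PySem.List.pop? arr c with
    | some xr => reorderA_loop skp (l - 1) (PySem.Int.mod c l) xr.2 (reordered ++ [xr.1])
    | none => reordered   -- unreachable while arr.length = l (Python IndexError cannot occur)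
  else reordered
termination_by l.toNat
decreasing_by omega

def reorderQueue (length : Int) (offset : Int) (skip : Int) : List Int :=
  let l := length
  let arr := PySem.List.pyRange 0 l 1
  let current := offset - 1
  if skip < 0 then
    reorderA_loop (skip - 1) l (PySem.Int.mod (current + 1) l) arr []
  else
    reorderA_loop skip l current arr []

-- ===== PORT B =====
-- Source B's nested tuples: leaf = (count, value), node = (count, left, right)
inductive PvTree where
  | leaf : Int → Int → PvTree
  | node : Int → PvTree → PvTree → PvTree
deriving DecidableEq, Repr

-- t[0]
def pvCount : PvTree → Int
  | .leaf c _ => c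
  | .node c _ _ => c

-- port of _build (only ever called with lo < hi; the inner guard makes the
-- same recursion total in Lean and is not taken on Source B's calls)
def pvBuild (lo hi : Int) : PvTree :=
  if hi - lo = 1 then .leaf 1 lo
  else if _h : 2 ≤ hi - lo then
    let mid := PySem.Int.floordiv (lo + hi) 2
    .node (hi - lo) (pvBuild lo mid) (pvBuild mid hi)
  else .leaf 1 lo   -- unreachable on Source B's calls (hi - lo ≥ 1 always)
termination_by (hi - lo).toNat
decreasing_by
  all_goals
    have h1 : lo + 1 ≤ PySem.Int.floordiv (lo + hi) 2 :=
      (PySem.Int.le_floordiv_iff_mul_le (by omega)).mpr (by omega)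
    have h2 : PySem.Int.floordiv (lo + hi) 2 < hi :=
      (PySem.Int.floordiv_lt_iff_lt_mul (by omega)).mpr (by omega)
    omega

-- port of _extract
def pvExtract (t : PvTree) (k : Int) : Int × PvTree :=
  match t with
  | .leaf _c v => (v, .leaf 0 v)
  | .node c l r =>
    let cl := pvCount l
    if k < cl then
      let p := pvExtract l k
      (p.1, .node (c - 1) p.2 r)
    else
      let p := pvExtract r (k - cl)
      (p.1, .node (c - 1) l p.2)

-- port of B's while-loop
def pvLoopB (step : Int) (size : Int) (current : Int) (t : PvTree) (out : List Int) : List Int :=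
  if _h : size > 0 then
    let c := PySem.Int.mod (current + step) size
    let p := pvExtract t c
    pvLoopB step (size - 1) c p.2 (out ++ [p.1])
  else out
termination_by size.toNat
decreasing_by omega

def reorderQueue_alt (length : Int) (offset : Int) (skip : Int) : List Int :=
  let step := if skip < 0 then skip - 1 else skip
  let current := if skip < 0 then (offset - 1) + 1 else offset - 1
  let size := if length > 0 then length else 0
  if size = 0 then []
  else pvLoopB step size current (pvBuild 0 size) []

-- ===== PRECONDITION & SPEC =====
-- Pre_ excludes only length = 0 with skip < 0, where A's '(current + 1) % l' raises ZeroDivisionError.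
def Pre_reorderQueue (length : Int) (offset : Int) (skip : Int) : Prop :=
  ¬ (length = 0 ∧ skip < 0)
instance (length : Int) (offset : Int) (skip : Int) : Decidable (Pre_reorderQueue length offset skip) := by unfold Pre_reorderQueue; infer_instance

def pvWitness_reorderQueue : Int × Int × Int := (6, 2, 3)

def Spec_reorderQueue (length : Int) (offset : Int) (skip : Int) (out : List Int) : Prop := out = reorderQueue_alt length offset skip
instance (length : Int) (offset : Int) (skip : Int) (out : List Int) : Decidable (Spec_reorderQueue length offset skip out) := by unfold Spec_reorderQueue; infer_instance

-- ===== CLAIM (what is proved, stated in full; the proofs are below) =====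
def Claim_equal_reorderQueue : Prop := ∀ (length : Int) (offset : Int) (skip : Int), Dom_reorderQueue length offset skip → Pre_reorderQueue length offset skip → Spec_reorderQueue length offset skip (reorderQueue length offset skip)

-- ===== LEMMAS AND PROOFS =====

-- the survivors a tree represents, in order
def pvFlat : PvTree → List Int
  | .leaf c v => if c = 1 then [v] else []
  | .node _ l r => pvFlat l ++ pvFlat r

-- well-formedness: leaf counts are 0/1, node counts add up
def pvGood : PvTree → Prop
  | .leaf c _ => c = 0 ∨ c = 1
  | .node c l r => c = pvCount l + pvCount r ∧ pvGood l ∧ pvGood r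

theorem pvCount_flat (t : PvTree) (h : pvGood t) :
    pvCount t = ((pvFlat t).length : Int) := by
  induction t with
  | leaf c v =>
    rcases h with h | h <;> subst h <;> simp [pvCount, pvFlat]
  | node c l r ihl ihr =>
    obtain ⟨hc, hl, hr⟩ := h
    rw [show pvCount (PvTree.node c l r) = c from rfl,
        show pvFlat (PvTree.node c l r) = pvFlat l ++ pvFlat r from rfl,
        hc, ihl hl, ihr hr, List.length_append]
    push_cast
    ring

theorem pvBuild_spec (n : Nat) : ∀ (lo hi : Int), (hi - lo).toNat = n → lo < hi →
    pvGood (pvBuild lo hi) ∧ pvFlat (pvBuild lo hi) = PySem.List.pyRange lo hi 1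
      ∧ pvCount (pvBuild lo hi) = hi - lo := by
  induction n using Nat.strong_induction_on with
  | _ n ih =>
    intro lo hi hn hlt
    rw [pvBuild]
    by_cases h1 : hi - lo = 1
    · simp only [if_pos h1]
      refine ⟨Or.inr rfl, ?_, by simp [pvCount]; omega⟩
      rw [PySem.List.pyRange_one_cons hlt, PySem.List.pyRange_one_eq_nil (by omega)]
      simp [pvFlat]
    · have h2 : 2 ≤ hi - lo := by omega
      simp only [if_neg h1, dif_pos h2]
      have hmid1 : lo + 1 ≤ PySem.Int.floordiv (lo + hi) 2 :=
        (PySem.Int.le_floordiv_iff_mul_le (by omega)).mpr (by omega)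
      have hmid2 : PySem.Int.floordiv (lo + hi) 2 < hi :=
        (PySem.Int.floordiv_lt_iff_lt_mul (by omega)).mpr (by omega)
      set mid := PySem.Int.floordiv (lo + hi) 2 with hmid
      obtain ⟨gl, fl, cl⟩ := ih (mid - lo).toNat (by omega) lo mid rfl (by omega)
      obtain ⟨gr, fr, cr⟩ := ih (hi - mid).toNat (by omega) mid hi rfl (by omega)
      refine ⟨⟨by rw [cl, cr]; omega, gl, gr⟩, ?_, rfl⟩
      simp only [pvFlat, fl, fr]
      exact (PySem.List.pyRange_one_append lo mid hi (by omega) (by omega)).symm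

theorem pvExtract_spec (t : PvTree) : ∀ (k : Int), pvGood t → 0 ≤ k → k < pvCount t →
    ∃ hk : k.toNat < (pvFlat t).length,
      (pvExtract t k).1 = (pvFlat t)[k.toNat]'hk
      ∧ pvGood (pvExtract t k).2
      ∧ pvFlat (pvExtract t k).2 = (pvFlat t).eraseIdx k.toNat
      ∧ pvCount (pvExtract t k).2 = pvCount t - 1 := by
  induction t with
  | leaf c v =>
    intro k hg h0 hlt
    have hc : c = 1 := by rcases hg with h | h <;> simp [pvCount, h] at hlt ⊢ <;> omega
    have hk0 : k = 0 := by simp [pvCount, hc] at hlt; omega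
    subst hc; subst hk0
    exact ⟨by simp [pvFlat], by simp [pvExtract, pvFlat],
      Or.inl rfl, by simp [pvExtract, pvFlat], by simp [pvExtract, pvCount]⟩
  | node c l r ihl ihr =>
    intro k hg h0 hlt
    obtain ⟨hc, hgl, hgr⟩ := hg
    have hcl := pvCount_flat l hgl
    have hcr := pvCount_flat r hgr
    by_cases hsplit : k < pvCount l
    · have hE : pvExtract (PvTree.node c l r) k
          = ((pvExtract l k).1, PvTree.node (c - 1) (pvExtract l k).2 r) := by
        simp only [pvExtract]
        rw [if_pos hsplit]
      obtain ⟨hk, hv, hg', hf', hc'⟩ := ihl k hgl h0 hsplit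
      have hktot : k.toNat < (pvFlat l ++ pvFlat r).length := by simp; omega
      refine ⟨by simpa [pvFlat] using hktot, ?_, ?_, ?_, ?_⟩
      · rw [hE]
        show (pvExtract l k).1 = (pvFlat l ++ pvFlat r)[k.toNat]'hktot
        rw [List.getElem_append_left hk]
        exact hv
      · rw [hE]
        exact ⟨by rw [hc, hc']; ring, hg', hgr⟩
      · rw [hE]
        show pvFlat (pvExtract l k).2 ++ pvFlat r = (pvFlat l ++ pvFlat r).eraseIdx k.toNat
        rw [List.eraseIdx_append_of_lt_length hk, hf']
      · rw [hE]
        show c - 1 = pvCount (PvTree.node c l r) - 1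
        rfl
    · have hE : pvExtract (PvTree.node c l r) k
          = ((pvExtract r (k - pvCount l)).1,
             PvTree.node (c - 1) l (pvExtract r (k - pvCount l)).2) := by
        simp only [pvExtract]
        rw [if_neg hsplit]
      have h0' : 0 ≤ k - pvCount l := by omega
      have hlt' : k - pvCount l < pvCount r := by
        have : pvCount (PvTree.node c l r) = c := rfl
        omega
      obtain ⟨hk, hv, hg', hf', hc'⟩ := ihr (k - pvCount l) hgr h0' hlt'
      have hnn : 0 ≤ pvCount l := by omega
      have hkn : (k - pvCount l).toNat = k.toNat - (pvFlat l).length := by omega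
      have hge : (pvFlat l).length ≤ k.toNat := by omega
      have hktot : k.toNat < (pvFlat l ++ pvFlat r).length := by simp; omega
      simp only [hkn] at hv hf'
      refine ⟨by simpa [pvFlat] using hktot, ?_, ?_, ?_, ?_⟩
      · rw [hE]
        show (pvExtract r (k - pvCount l)).1 = (pvFlat l ++ pvFlat r)[k.toNat]'hktot
        rw [List.getElem_append_right hge]
        exact hv
      · rw [hE]
        exact ⟨by rw [hc, hc']; ring, hgl, hg'⟩
      · rw [hE]
        show pvFlat l ++ pvFlat (pvExtract r (k - pvCount l)).2
            = (pvFlat l ++ pvFlat r).eraseIdx k.toNat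
        rw [List.eraseIdx_append_of_length_le hge, hf']
      · rw [hE]
        show c - 1 = pvCount (PvTree.node c l r) - 1
        rfl

-- A's loop over (arr, current) and B's loop over the count tree produce the same output
theorem pvLoopAB : ∀ (n : Nat) (arr : List Int) (t : PvTree) (cA cB skp : Int) (out : List Int),
    pvGood t → pvFlat t = arr → arr.length = n →
    (n ≠ 0 → PySem.Int.mod cA (n : Int) = PySem.Int.mod cB (n : Int)) →
    reorderA_loop skp (n : Int) cA arr out = pvLoopB skp (n : Int) cB t out := by
  intro n
  induction n with
  | zero =>
    intro arr t cA cB skp out _ _ _ _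
    rw [reorderA_loop, pvLoopB]
    simp
  | succ n ih =>
    intro arr t cA cB skp out hg hf hlen hcur
    have hl : (0 : Int) < ((n+1 : Nat) : Int) := by omega
    set l : Int := ((n+1 : Nat) : Int) with hldef
    have hcc : PySem.Int.mod (cA + skp) l = PySem.Int.mod (cB + skp) l := by
      have h := hcur (by omega)
      simp only [PySem.Int.mod_eq_emod_of_pos hl] at h ⊢
      rw [Int.add_emod cA skp l, Int.add_emod cB skp l, h]
    set c : Int := PySem.Int.mod (cA + skp) l with hcdef
    have hc0 : 0 ≤ c := PySem.Int.mod_nonneg _ hl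
    have hcl : c < l := PySem.Int.mod_lt _ hl
    have hcnat : c.toNat < arr.length := by omega
    have hcount : pvCount t = ((n+1 : Nat) : Int) := by
      rw [pvCount_flat t hg, hf, hlen]
    obtain ⟨hk, hv, hg', hf', hc'⟩ := pvExtract_spec t c hg hc0 (by omega)
    have hpop : PySem.List.pop? arr c = some (arr[c.toNat], arr.eraseIdx c.toNat) := by
      have hp := PySem.List.pop?_natCast arr c.toNat hcnat
      have hc' : ((c.toNat : Nat) : Int) = c := by omega
      rw [hc'] at hp
      exact hp
    have hmodc : PySem.Int.mod c l = c := by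
      rw [PySem.Int.mod_eq_emod_of_pos hl, Int.emod_eq_of_lt hc0 hcl]
    have hA : reorderA_loop skp l cA arr out
        = reorderA_loop skp (l - 1) c (arr.eraseIdx c.toNat) (out ++ [arr[c.toNat]]) := by
      rw [reorderA_loop]
      simp only [dif_pos hl, ← hcdef, hpop, hmodc]
    have hvv : (pvExtract t c).1 = arr[c.toNat]'hcnat := by
      rw [hv]
      simp only [hf]
    have hB : pvLoopB skp l cB t out
        = pvLoopB skp (l - 1) c (pvExtract t c).2 (out ++ [arr[c.toNat]]) := by
      rw [pvLoopB]
      simp only [dif_pos hl, ← hcc, hvv]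
    rw [hA, hB]
    have hl1 : l - 1 = ((n : Nat) : Int) := by omega
    rw [hl1]
    exact ih (arr.eraseIdx c.toNat) (pvExtract t c).2 c c skp (out ++ [arr[c.toNat]])
      hg' (by rw [hf', hf]) (by rw [List.length_eraseIdx_of_lt hcnat, hlen]; omega)
      (fun _ => rfl)

theorem pvTop (length offset skip : Int) :
    reorderQueue length offset skip = reorderQueue_alt length offset skip := by
  by_cases hpos : 0 < length
  · have hlenq : (PySem.List.pyRange 0 length 1).length = (length - 0).toNat :=
      PySem.List.length_pyRange_one 0 length
    have hlen : (PySem.List.pyRange 0 length 1).length = length.toNat := by omega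
    obtain ⟨hg, hf, _⟩ := pvBuild_spec (length - 0).toNat 0 length rfl hpos
    have hsz : (if length > 0 then length else 0) = length := if_pos hpos
    simp only [reorderQueue, reorderQueue_alt, hsz, if_neg (by omega : ¬ length = 0)]
    have hlcast : ((PySem.List.pyRange 0 length 1).length : Int) = length := by
      rw [hlen]; omega
    split_ifs with hs
    · have key := pvLoopAB (PySem.List.pyRange 0 length 1).length
        (PySem.List.pyRange 0 length 1) (pvBuild 0 length)
        (PySem.Int.mod ((offset - 1) + 1) length) ((offset - 1) + 1) (skip - 1) []
        hg hf rfl ?_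
      · rw [hlcast] at key
        exact key
      · intro _
        rw [hlcast]
        have hlpos : (0 : Int) < length := hpos
        simp only [PySem.Int.mod_eq_emod_of_pos hlpos]
        exact Int.emod_emod_of_dvd _ (dvd_refl length)
    · have key := pvLoopAB (PySem.List.pyRange 0 length 1).length
        (PySem.List.pyRange 0 length 1) (pvBuild 0 length)
        (offset - 1) (offset - 1) skip []
        hg hf rfl (fun _ => rfl)
      rw [hlcast] at key
      exact key
  · have harr : (PySem.List.pyRange 0 length 1) = [] :=
      PySem.List.pyRange_one_eq_nil (by omega)
    have hA : ∀ s cur, reorderA_loop s length cur [] [] = [] := by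
      intro s cur; rw [reorderA_loop]; simp only [dif_neg (by omega : ¬ length > 0)]
    have hsz : (if length > 0 then length else 0) = 0 := if_neg (by omega)
    simp only [reorderQueue, reorderQueue_alt, harr, hsz]
    split_ifs with hs <;> rw [hA]

-- ===== VERDICT (by name: the statement is the Claim_ definition above) =====
theorem reorderQueue_spec : Claim_equal_reorderQueue := by
  intro length offset skip _ _
  exact pvTop length offset skip
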